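-- pv_equiv track=rewrite | github.com/Giannasfrisi/Introduction-to-Python | ProblemSet2/ps2pr5.py | process
-- ===== SOURCE A (Python) =====
-- def process(vals):
--     """Takes a list of values and
--     uses recursion to return each
--     odd number with its square"""
--
--     if vals == []:
--         return []
--     else:
--         process_rest = process(vals[1:])
--         if vals[0] % 2 == 0:
--             return [vals[0]] + process_rest
--         elif vals[0] % 2 != 0:
--             return [(vals[0]**2)] + process_rest
-- ===== SOURCE B (Python) =====
-- def process(vals):
--     result = []
--     for v in vals:
--         if v % 2 == 0:
--             result.append(v)
--         else:
--             result.append(v ** 2)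
--     return result
-- ===== Notes on version B (the rewrite author's own statement) =====
-- stated objective: faster
-- what changed: Replaced A's recursion (base case plus prepend-head via list concatenation, one stack frame and one slice copy per element) by a single iterative left-to-right pass appending to an accumulator list.
import Mathlib
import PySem

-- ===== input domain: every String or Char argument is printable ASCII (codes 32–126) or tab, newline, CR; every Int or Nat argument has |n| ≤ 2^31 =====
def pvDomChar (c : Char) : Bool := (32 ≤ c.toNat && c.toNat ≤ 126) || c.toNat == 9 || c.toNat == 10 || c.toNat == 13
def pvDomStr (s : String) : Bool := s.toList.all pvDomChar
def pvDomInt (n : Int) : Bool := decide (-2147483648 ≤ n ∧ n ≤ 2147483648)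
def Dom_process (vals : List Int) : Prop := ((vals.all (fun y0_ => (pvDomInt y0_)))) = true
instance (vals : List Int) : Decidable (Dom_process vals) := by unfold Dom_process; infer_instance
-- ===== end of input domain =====

-- B replaces A's recursion (prepend-head plus recursive tail) by an iterative accumulator loop; simpler, same values.
-- ===== PORT A =====
def process (vals : List Int) : List Int :=
  match vals with
  | [] => []
  | v :: rest =>
    let process_rest := process rest
    if PySem.Int.mod v 2 = 0 then [v] ++ process_rest
    else [v ^ 2] ++ process_rest

-- ===== PORT B =====
def process_alt (vals : List Int) : List Int :=
  vals.foldl (fun result v =>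
    if PySem.Int.mod v 2 = 0 then result ++ [v] else result ++ [v ^ 2]) []

-- ===== PRECONDITION & SPEC =====
def Spec_process (vals : List Int) (out : List Int) : Prop := out = process_alt vals
instance (vals : List Int) (out : List Int) : Decidable (Spec_process vals out) := by unfold Spec_process; infer_instance

-- ===== CLAIM (what is proved, stated in full; the proofs are below) =====
def Claim_equal_process : Prop := ∀ (vals : List Int), Dom_process vals → Spec_process vals (process vals)

-- ===== LEMMAS AND PROOFS =====

-- ===== VERDICT (by name: the statement is the Claim_ definition above) =====
theorem process_alt_acc (vals : List Int) (acc : List Int) :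
    vals.foldl (fun result v =>
      if PySem.Int.mod v 2 = 0 then result ++ [v] else result ++ [v ^ 2]) acc
      = acc ++ process vals := by
  induction vals generalizing acc with
  | nil => simp [process]
  | cons v rest ih =>
    simp only [List.foldl, process]
    split_ifs with h <;> rw [ih] <;> simp

theorem process_spec : Claim_equal_process := by
  intro vals _
  unfold Spec_process process_alt
  rw [process_alt_acc]
  simp
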